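-- pv_equiv track=rewrite | github.com/dymodi/dymodi.github.io | Research/Beacon/src/radd.py | window_filter
-- ===== SOURCE A (Python) =====
-- def window_filter(y, n):
--     x = [i for i in y]
--     headPos = 0
--     tailPos = 0
--     lastNbr = 0
--     for currPos in range(0, len(x)):
--         # Force set ones
--         if lastNbr == 0 and x[currPos] == 1:
--             headPos = currPos
--             if currPos - tailPos < n and headPos <= tailPos:
--                 for i in range(tailPos, currPos):
--                     x[i] = 1
--         # Force set zeros
--         if lastNbr == 1 and x[currPos] == 0:
--             tailPos = currPos
--             if currPos - headPos < n and headPos <= tailPos: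
--                 for i in range(headPos, currPos):
--                     x[i] = 0
--         lastNbr = x[currPos]
--     return x
-- ===== SOURCE B (Python) =====
-- def window_filter(y, n):
--     # First pass: detect exact 0->1 / 1->0 transitions, collect closed runs of length < n.
--     segs = []
--     start = 0
--     prev = 0
--     for i, v in enumerate(y):
--         if prev == 0 and v == 1:
--             start = i
--         elif prev == 1 and v == 0:
--             if i - start < n:
--                 segs.append((start, i))
--         prev = v
--     # Second pass: zero out the collected short segments.
--     x = list(y)
--     for s, e in segs:
--         x[s:e] = [0] * (e - s)
--     return x
-- ===== Notes on version B (the rewrite author's own statement) =====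
-- stated objective: simpler
-- what changed: Replaces A's single stateful in-place loop (head/tail pointers, in-loop index fills, and a dead rising-edge fill branch) by a two-pass decomposition: a scan that collects closed 1-runs shorter than n as (start,end) segments, then one pass that zeroes exactly those slices of a fresh copy.
import Mathlib
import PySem

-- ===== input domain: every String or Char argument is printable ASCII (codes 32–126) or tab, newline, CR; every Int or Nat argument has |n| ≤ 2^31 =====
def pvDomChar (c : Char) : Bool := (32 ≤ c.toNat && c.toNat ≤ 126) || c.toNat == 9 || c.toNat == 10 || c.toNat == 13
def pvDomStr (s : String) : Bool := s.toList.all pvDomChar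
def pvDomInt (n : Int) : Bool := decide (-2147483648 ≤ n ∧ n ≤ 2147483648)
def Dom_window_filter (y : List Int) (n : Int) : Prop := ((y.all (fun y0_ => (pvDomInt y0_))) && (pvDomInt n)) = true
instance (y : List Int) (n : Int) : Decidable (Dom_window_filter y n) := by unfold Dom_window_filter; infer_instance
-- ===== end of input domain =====

-- B replaces A's stateful in-place index loop by a two-pass decomposition: a scan that
-- collects the closed 1-runs shorter than n as (start,end) segments, then a pass that
-- zeroes exactly those slices of a fresh copy (objective: simpler).

-- ===== PORT A =====
-- loop body of A's 'for currPos in range(0, len(x))', state = (x, headPos, tailPos, lastNbr)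
def wfStep (n : Int) (s : List Int × Int × Int × Int) (currPos : Int) : List Int × Int × Int × Int :=
  let x := s.1
  let headPos := s.2.1
  let tailPos := s.2.2.1
  let lastNbr := s.2.2.2
  -- Force set ones
  let hx : List Int × Int :=
    if lastNbr = 0 ∧ PySem.List.pyGetD x currPos 0 = 1 then
      (if currPos - tailPos < n ∧ currPos ≤ tailPos then
          (PySem.List.pyRange tailPos currPos 1).foldl (fun x i => x.set i.toNat 1) x
        else x, currPos)
    else (x, headPos)
  -- Force set zeros
  let tx : List Int × Int :=
    if lastNbr = 1 ∧ PySem.List.pyGetD hx.1 currPos 0 = 0 then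
      (if currPos - hx.2 < n ∧ hx.2 ≤ currPos then
          (PySem.List.pyRange hx.2 currPos 1).foldl (fun x i => x.set i.toNat 0) hx.1
        else hx.1, currPos)
    else (hx.1, tailPos)
  (tx.1, hx.2, tx.2, PySem.List.pyGetD tx.1 currPos 0)

def window_filter (y : List Int) (n : Int) : List Int :=
  let x := y.map (fun i => i)
  ((PySem.List.pyRange 0 (x.length : Int) 1).foldl (wfStep n) (x, 0, 0, 0)).1

-- ===== PORT B =====
-- loop body of B's first pass (enumerate scan), state = (segs, start, prev)
def wfScanStep (n : Int) (s : List (Int × Int) × Int × Int) (iv : Int × Int) : List (Int × Int) × Int × Int :=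
  let segs := s.1
  let start := s.2.1
  let prev := s.2.2
  if prev = 0 ∧ iv.2 = 1 then (segs, iv.1, iv.2)
  else if prev = 1 ∧ iv.2 = 0 then
    (if iv.1 - start < n then segs ++ [(start, iv.1)] else segs, start, iv.2)
  else (segs, start, iv.2)

-- B's slice assignment x[s:e] = [0]*(e-s)  (exact: the collected segments satisfy 0 ≤ s ≤ e ≤ len x)
def wfZero (x : List Int) (se : Int × Int) : List Int :=
  x.take se.1.toNat ++ List.replicate (se.2 - se.1).toNat 0 ++ x.drop se.2.toNat

def window_filter_alt (y : List Int) (n : Int) : List Int :=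
  let segs := ((PySem.List.enumerate y 0).foldl (wfScanStep n) ([], 0, 0)).1
  segs.foldl wfZero y

-- ===== PRECONDITION & SPEC =====
def Spec_window_filter (y : List Int) (n : Int) (out : List Int) : Prop := out = window_filter_alt y n
instance (y : List Int) (n : Int) (out : List Int) : Decidable (Spec_window_filter y n out) := by unfold Spec_window_filter; infer_instance

-- ===== CLAIM (what is proved, stated in full; the proofs are below) =====
def Claim_equal_window_filter : Prop := ∀ (y : List Int) (n : Int), Dom_window_filter y n → Spec_window_filter y n (window_filter y n)

-- ===== LEMMAS AND PROOFS =====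

-- the state of B's scan after the first k elements
def wfScan (y : List Int) (n : Int) (k : Nat) : List (Int × Int) × Int × Int :=
  ((PySem.List.enumerate y 0).take k).foldl (wfScanStep n) ([], 0, 0)

lemma wfZero_length (x : List Int) (s e : Int) (h0 : 0 ≤ s) (hse : s ≤ e) (hel : e ≤ (x.length : Int)) :
    (wfZero x (s, e)).length = x.length := by
  simp [wfZero]
  omega

lemma wfZero_getElem?_ge (x : List Int) (s e : Int) (i : Nat)
    (h0 : 0 ≤ s) (hse : s ≤ e) (hel : e ≤ (x.length : Int)) (hi : e ≤ (i : Int)) :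
    (wfZero x (s, e))[i]? = x[i]? := by
  have hs : s.toNat ≤ e.toNat := by omega
  have hi' : e.toNat ≤ i := by omega
  have hlen : e.toNat ≤ x.length := by omega
  rw [wfZero]
  rw [List.getElem?_append_right (by simp; omega)]
  rw [List.getElem?_drop]
  congr 1
  simp
  omega

lemma foldl_wfZero_length (segs : List (Int × Int)) (x : List Int)
    (h : ∀ p ∈ segs, 0 ≤ p.1 ∧ p.1 ≤ p.2 ∧ p.2 ≤ (x.length : Int)) :
    (segs.foldl wfZero x).length = x.length := by
  induction segs generalizing x with
  | nil => rfl
  | cons p rest ih =>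
    obtain ⟨h1, h2, h3⟩ := h p (List.mem_cons_self ..)
    have hz : (wfZero x p).length = x.length := by
      obtain ⟨s, e⟩ := p; exact wfZero_length x s e h1 h2 h3
    rw [List.foldl_cons, ih (wfZero x p) ?_, hz]
    intro q hq
    obtain ⟨g1, g2, g3⟩ := h q (List.mem_cons_of_mem _ hq)
    exact ⟨g1, g2, by rw [hz]; exact g3⟩

lemma foldl_wfZero_getElem?_ge (segs : List (Int × Int)) (x : List Int) (i : Nat)
    (h : ∀ p ∈ segs, 0 ≤ p.1 ∧ p.1 ≤ p.2 ∧ p.2 ≤ (x.length : Int) ∧ p.2 ≤ (i : Int)) :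
    (segs.foldl wfZero x)[i]? = x[i]? := by
  induction segs generalizing x with
  | nil => rfl
  | cons p rest ih =>
    obtain ⟨h1, h2, h3, h4⟩ := h p (List.mem_cons_self ..)
    have hz : (wfZero x p).length = x.length := by
      obtain ⟨s, e⟩ := p; exact wfZero_length x s e h1 h2 h3
    have hz2 : (wfZero x p)[i]? = x[i]? := by
      obtain ⟨s, e⟩ := p; exact wfZero_getElem?_ge x s e i h1 h2 h3 h4
    rw [List.foldl_cons, ih (wfZero x p) ?_, hz2]
    intro q hq
    obtain ⟨g1, g2, g3, g4⟩ := h q (List.mem_cons_of_mem _ hq)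
    exact ⟨g1, g2, by rw [hz]; exact g3, g4⟩

-- A's inner zero-fill loop is B's slice assignment
lemma setLoop_eq_wfZero (x : List Int) (s e : Int) (h0 : 0 ≤ s) (hse : s ≤ e) (hel : e ≤ (x.length : Int)) :
    (PySem.List.pyRange s e 1).foldl (fun x i => x.set i.toNat 0) x = wfZero x (s, e) := by
  have hd : e = s + ((e - s).toNat : Int) := by omega
  rw [hd] at hel ⊢
  clear hd hse
  generalize (e - s).toNat = d at *
  induction d generalizing x s with
  | zero =>
    rw [PySem.List.pyRange_one_eq_nil (by omega)]
    simp [wfZero]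
  | succ m ih =>
    rw [PySem.List.pyRange_one_cons (by omega)]
    rw [List.foldl_cons]
    have hslt : s.toNat < x.length := by omega
    have hset : (x.set s.toNat 0).length = x.length := by simp
    have : s + (↑(m + 1) : Int) = (s + 1) + (↑m : Int) := by push_cast; ring
    rw [this] at hel ⊢
    rw [ih (x.set s.toNat 0) (s + 1) (by omega) (by rw [hset]; exact hel)]
    -- splice of the set list from s+1 equals splice of x from s
    rw [List.set_eq_take_append_cons_drop, if_pos hslt]
    unfold wfZero
    have h1 : (s + 1).toNat = s.toNat + 1 := by omega
    have h2 : ((s + 1 + ↑m - (s + 1)).toNat) = m := by omega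
    have h3 : ((s + 1 + ↑m - s).toNat) = m + 1 := by omega
    have h4 : ((s + 1 + ↑m).toNat) = s.toNat + 1 + m := by omega
    rw [h1, h2, h3, h4]
    rw [List.take_append, List.drop_append]
    simp [List.take_take, List.length_take]
    have hmin : min s.toNat x.length = s.toNat := by omega
    have e1 : s.toNat + 1 - s.toNat = 1 := by omega
    have e2 : s.toNat + 1 + m - s.toNat = m + 1 := by omega
    rw [hmin, e1, e2]
    have e3 : List.drop (s.toNat + 1 + m) (List.take s.toNat x) = [] := by
      apply List.drop_eq_nil_of_le
      simp
      omega
    rw [e3]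
    simp [List.replicate_succ, List.drop_drop]

-- one step of A on an exact 0→1 transition (the ones-fill range is empty whenever its guard holds)
lemma wfStep_transition01 (n : Int) (X : List Int) (st t c : Int)
    (hXk : PySem.List.pyGetD X c 0 = 1) :
    wfStep n (X, st, t, 0) c = (X, c, t, 1) := by
  unfold wfStep
  simp only [hXk]
  split_ifs with h1 h3 h4 <;> simp_all

-- one step of A on an exact 1→0 transition closing a short run: zero-fill fires
lemma wfStep_transition10_fill (n : Int) (X Z : List Int) (st t c : Int)
    (hXk : PySem.List.pyGetD X c 0 = 0) (hZk : PySem.List.pyGetD Z c 0 = 0)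
    (hsk : st ≤ c) (hn : c - st < n)
    (hfill : (PySem.List.pyRange st c 1).foldl (fun x i => x.set i.toNat 0) X = Z) :
    wfStep n (X, st, t, 1) c = (Z, st, c, 0) := by
  unfold wfStep
  simp [hXk, hsk, hn, hfill, hZk]

-- one step of A on an exact 1→0 transition closing a long run: no fill
lemma wfStep_transition10_nofill (n : Int) (X : List Int) (st t c : Int)
    (hXk : PySem.List.pyGetD X c 0 = 0) (hsk : st ≤ c) (hn : ¬ (c - st < n)) :
    wfStep n (X, st, t, 1) c = (X, st, c, 0) := by
  unfold wfStep
  simp [hXk, hsk, hn]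

-- one step of A when no exact transition happens: only lastNbr changes
lemma wfStep_no_transition (n : Int) (X : List Int) (st t pv v c : Int)
    (hXk : PySem.List.pyGetD X c 0 = v)
    (c1 : ¬ (pv = 0 ∧ v = 1)) (c2 : ¬ (pv = 1 ∧ v = 0)) :
    wfStep n (X, st, t, pv) c = (X, st, t, v) := by
  unfold wfStep
  simp only [hXk]
  simp [c1, c2, hXk]

-- main loop invariant: after k steps, A's x is y with the scanned segments zeroed,
-- A's headPos is B's start, A's lastNbr is B's prev, and everything is bounded by k
lemma wf_invariant (y : List Int) (n : Int) (k : Nat) (hk : k ≤ y.length) :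
    ∃ t : Int,
      (PySem.List.pyRange 0 (k : Int) 1).foldl (wfStep n) (y, 0, 0, 0)
        = ((wfScan y n k).1.foldl wfZero y, (wfScan y n k).2.1, t, (wfScan y n k).2.2)
      ∧ 0 ≤ t ∧ t ≤ (k : Int)
      ∧ 0 ≤ (wfScan y n k).2.1 ∧ (wfScan y n k).2.1 ≤ (k : Int)
      ∧ (∀ p ∈ (wfScan y n k).1, 0 ≤ p.1 ∧ p.1 ≤ p.2 ∧ p.2 ≤ (k : Int)) := by
  induction k with
  | zero =>
    refine ⟨0, ?_, le_refl 0, le_refl 0, le_refl 0, le_refl 0, by simp [wfScan]⟩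
    simp [wfScan, PySem.List.pyRange_one_eq_nil (le_refl (0 : Int))]
  | succ k ih =>
    have hk' : k < y.length := hk
    obtain ⟨t, heq, ht0, htk, hs0, hsk, hsegs⟩ := ih (Nat.le_of_lt hk')
    obtain ⟨v, hv⟩ : ∃ v, y[k]? = some v := ⟨y[k], List.getElem?_eq_getElem hk'⟩
    have hrange : PySem.List.pyRange 0 ((k + 1 : Nat) : Int) 1
        = PySem.List.pyRange 0 (k : Int) 1 ++ [(k : Int)] := by
      push_cast
      exact PySem.List.pyRange_one_succ_right (by positivity)
    have htake : (PySem.List.enumerate y 0).take (k + 1)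
        = (PySem.List.enumerate y 0).take k ++ [((k : Int), v)] := by
      rw [List.take_add_one, PySem.List.getElem?_enumerate, hv]
      simp
    have hscan : wfScan y n (k + 1) = wfScanStep n (wfScan y n k) ((k : Int), v) := by
      rw [wfScan, htake, List.foldl_append, ← wfScan]
      rfl
    have hread : ∀ ss : List (Int × Int),
        (∀ p ∈ ss, 0 ≤ p.1 ∧ p.1 ≤ p.2 ∧ p.2 ≤ (k : Int)) →
        PySem.List.pyGetD (ss.foldl wfZero y) (k : Int) 0 = v := by
      intro ss hss
      have h1 : (ss.foldl wfZero y)[k]? = y[k]? := by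
        apply foldl_wfZero_getElem?_ge
        intro p hp
        obtain ⟨g1, g2, g3⟩ := hss p hp
        exact ⟨g1, g2, by omega, g3⟩
      rw [PySem.List.pyGetD_natCast, List.getD_eq_getElem?_getD, h1, hv]
      rfl
    rcases hSdef : wfScan y n k with ⟨segs, st, pv⟩
    rw [hSdef] at heq hs0 hsk hsegs
    simp only at heq hs0 hsk hsegs
    have hsegs' : ∀ p ∈ segs, 0 ≤ p.1 ∧ p.1 ≤ p.2 ∧ p.2 ≤ (k : Int) := hsegs
    have hXk : PySem.List.pyGetD (segs.foldl wfZero y) (k : Int) 0 = v := hread segs hsegs'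
    rw [hrange, List.foldl_append, heq, hscan, hSdef]
    have hlenb : ∀ p ∈ segs, 0 ≤ p.1 ∧ p.1 ≤ p.2 ∧ p.2 ≤ (y.length : Int) := by
      intro p hp
      obtain ⟨g1, g2, g3⟩ := hsegs' p hp
      exact ⟨g1, g2, by omega⟩
    have hlen : (segs.foldl wfZero y).length = y.length := foldl_wfZero_length segs y hlenb
    by_cases hb1 : pv = 0 ∧ v = 1
    · obtain ⟨hp0, hv1⟩ := hb1
      subst hp0 hv1
      have hB : wfScanStep n (segs, st, (0 : Int)) ((k : Int), 1) = (segs, (k : Int), 1) := by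
        simp [wfScanStep]
      rw [hB]
      refine ⟨t, ?_, ht0, by push_cast; omega, by positivity, by push_cast; omega, ?_⟩
      · exact wfStep_transition01 n (segs.foldl wfZero y) st t (k : Int) hXk
      · intro p hp
        obtain ⟨g1, g2, g3⟩ := hsegs' p hp
        exact ⟨g1, g2, by push_cast; omega⟩
    · by_cases hb2 : pv = 1 ∧ v = 0
      · obtain ⟨hp1, hv0⟩ := hb2
        subst hp1 hv0
        by_cases hn : (k : Int) - st < n
        · have hbnd : ∀ p ∈ segs ++ [(st, (k : Int))], 0 ≤ p.1 ∧ p.1 ≤ p.2 ∧ p.2 ≤ (k : Int) := by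
            intro p hp
            rcases List.mem_append.mp hp with hp | hp
            · exact hsegs' p hp
            · simp at hp
              rw [hp]
              exact ⟨hs0, hsk, le_refl _⟩
          have hfill : (PySem.List.pyRange st (k : Int) 1).foldl (fun x i => x.set i.toNat 0)
              (segs.foldl wfZero y) = (segs ++ [(st, (k : Int))]).foldl wfZero y := by
            rw [List.foldl_append]
            simp only [List.foldl_cons, List.foldl_nil]
            exact setLoop_eq_wfZero _ _ _ hs0 hsk (by rw [hlen]; push_cast; omega)
          have hZk : PySem.List.pyGetD ((segs ++ [(st, (k : Int))]).foldl wfZero y) (k : Int) 0 = 0 :=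
            hread _ hbnd
          have hB : wfScanStep n (segs, st, (1 : Int)) ((k : Int), 0)
              = (segs ++ [(st, (k : Int))], st, 0) := by
            simp [wfScanStep, hn]
          rw [hB]
          refine ⟨(k : Int), ?_, by positivity, by push_cast; omega, hs0, by push_cast; omega, ?_⟩
          · exact wfStep_transition10_fill n (segs.foldl wfZero y) _ st t (k : Int) hXk hZk hsk hn hfill
          · intro p hp
            obtain ⟨g1, g2, g3⟩ := hbnd p hp
            exact ⟨g1, g2, by push_cast; omega⟩
        · have hB : wfScanStep n (segs, st, (1 : Int)) ((k : Int), 0) = (segs, st, 0) := by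
            simp [wfScanStep, hn]
          rw [hB]
          refine ⟨(k : Int), ?_, by positivity, by push_cast; omega, hs0, by push_cast; omega, ?_⟩
          · exact wfStep_transition10_nofill n (segs.foldl wfZero y) st t (k : Int) hXk hsk hn
          · intro p hp
            obtain ⟨g1, g2, g3⟩ := hsegs' p hp
            exact ⟨g1, g2, by push_cast; omega⟩
      · have hB : wfScanStep n (segs, st, pv) ((k : Int), v) = (segs, st, v) := by
          simp only [wfScanStep, if_neg hb1, if_neg hb2]
        rw [hB]
        refine ⟨t, ?_, ht0, by push_cast; omega, hs0, by push_cast; omega, ?_⟩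
        · exact wfStep_no_transition n (segs.foldl wfZero y) st t pv v (k : Int) hXk hb1 hb2
        · intro p hp
          obtain ⟨g1, g2, g3⟩ := hsegs' p hp
          exact ⟨g1, g2, by push_cast; omega⟩

-- ===== VERDICT (by name: the statement is the Claim_ definition above) =====
theorem window_filter_spec : Claim_equal_window_filter := by
  intro y n _
  show window_filter y n = window_filter_alt y n
  obtain ⟨t, heq, -⟩ := wf_invariant y n y.length le_rfl
  have hscan : wfScan y n y.length = (PySem.List.enumerate y 0).foldl (wfScanStep n) ([], 0, 0) := by
    rw [wfScan, List.take_of_length_le (by simp [PySem.List.length_enumerate])]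
  rw [window_filter, window_filter_alt]
  simp only [List.map_id']
  rw [heq, hscan]
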